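-- pv_equiv track=rewrite | github.com/aditishenoy/Rosalind | bioinfoSH.py | CountDNA
-- ===== SOURCE A (Python) =====
-- def CountDNA(seq):
--     n = len(seq)
--     c1=c2=c3=c4 = 0
--     for i in range(n):
--         if seq[i] =='A':
--             c1 += 1
--         elif seq[i] == 'C':
--             c2 += 1
--         elif  seq[i] == 'G':
--             c3 += 1
--         else:
--             c4 += 1
--     return (c1, c2, c3, c4)
-- ===== SOURCE B (Python) =====
-- def CountDNA(seq):
--     a = seq.count('A')
--     c = seq.count('C')
--     g = seq.count('G')
--     return (a, c, g, len(seq) - a - c - g)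
-- ===== Notes on version B (the rewrite author's own statement) =====
-- stated objective: faster
-- what changed: Replaces A's single pass with a per-character four-way branch by three independent staged scans via str.count (one per named nucleotide), deriving the catch-all fourth count as len(seq) minus the three named counts.
import Mathlib
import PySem

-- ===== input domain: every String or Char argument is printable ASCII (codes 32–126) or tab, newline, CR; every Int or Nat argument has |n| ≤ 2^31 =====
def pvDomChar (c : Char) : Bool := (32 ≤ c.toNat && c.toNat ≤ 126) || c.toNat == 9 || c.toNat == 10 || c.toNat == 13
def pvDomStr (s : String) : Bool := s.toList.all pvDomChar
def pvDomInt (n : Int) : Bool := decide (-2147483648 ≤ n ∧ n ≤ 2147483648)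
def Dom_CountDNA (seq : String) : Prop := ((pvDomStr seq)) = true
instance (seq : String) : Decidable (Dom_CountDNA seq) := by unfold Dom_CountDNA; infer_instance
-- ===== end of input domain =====

-- B replaces A's single per-character branching loop by three staged str.count scans,
-- deriving the catch-all fourth count as len(seq) minus the three named counts.

-- ===== PORT A =====
-- A's for-loop over indices visits seq[i] for i in range(len(seq)) in order, i.e. the
-- characters of seq in order; ported as a fold over seq.toList carrying (c1,c2,c3,c4).
def CountDNA (seq : String) : Int × Int × Int × Int :=
  seq.toList.foldl
    (fun (s : Int × Int × Int × Int) ch =>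
      if ch = 'A' then (s.1 + 1, s.2.1, s.2.2.1, s.2.2.2)
      else if ch = 'C' then (s.1, s.2.1 + 1, s.2.2.1, s.2.2.2)
      else if ch = 'G' then (s.1, s.2.1, s.2.2.1 + 1, s.2.2.2)
      else (s.1, s.2.1, s.2.2.1, s.2.2.2 + 1))
    (0, 0, 0, 0)

-- ===== PORT B =====
def CountDNA_alt (seq : String) : Int × Int × Int × Int :=
  let a : Int := PySem.Str.count seq "A"
  let c : Int := PySem.Str.count seq "C"
  let g : Int := PySem.Str.count seq "G"
  (a, c, g, PySem.Str.len seq - a - c - g)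

-- ===== PRECONDITION & SPEC =====
def Spec_CountDNA (seq : String) (out : Int × Int × Int × Int) : Prop := out = CountDNA_alt seq
instance (seq : String) (out : Int × Int × Int × Int) : Decidable (Spec_CountDNA seq out) := by unfold Spec_CountDNA; infer_instance

-- ===== CLAIM (what is proved, stated in full; the proofs are below) =====
def Claim_equal_CountDNA : Prop := ∀ (seq : String), Dom_CountDNA seq → Spec_CountDNA seq (CountDNA seq)

-- ===== LEMMAS AND PROOFS =====

-- the fuel-based substring-count loop, specialised to a one-character pattern, is List.count
theorem go_single (c : Char) : ∀ (l : List Char) (fuel acc : Nat), l.length ≤ fuel →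
    PySem.Chars.count.go [c] fuel l acc = acc + l.count c := by
  intro l
  induction l with
  | nil => intro fuel acc h; cases fuel <;> simp [PySem.Chars.count.go]
  | cons x t ih =>
    intro fuel acc h
    cases fuel with
    | zero => simp at h
    | succ f =>
      have ht : t.length ≤ f := by simpa using h
      by_cases hc : c = x
      · subst hc
        simp [PySem.Chars.count.go, List.isPrefixOf, ih f (acc + 1) ht]
        omega
      · simp [PySem.Chars.count.go, List.isPrefixOf, Ne.symm hc, ih f acc ht, hc]

theorem chars_count_single (l : List Char) (c : Char) :
    PySem.Chars.count l [c] = l.count c := by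
  simp only [PySem.Chars.count]
  rw [if_neg (by simp)]
  simpa using go_single c l l.length 0 le_rfl

-- A's fold accumulates the three named counts and the length-remainder
theorem countDNA_foldl_eq (l : List Char) (a b c d : Int) :
    l.foldl
      (fun (s : Int × Int × Int × Int) ch =>
        if ch = 'A' then (s.1 + 1, s.2.1, s.2.2.1, s.2.2.2)
        else if ch = 'C' then (s.1, s.2.1 + 1, s.2.2.1, s.2.2.2)
        else if ch = 'G' then (s.1, s.2.1, s.2.2.1 + 1, s.2.2.2)
        else (s.1, s.2.1, s.2.2.1, s.2.2.2 + 1))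
      (a, b, c, d)
    = (a + l.count 'A', b + l.count 'C', c + l.count 'G',
       d + ((l.length : Int) - l.count 'A' - l.count 'C' - l.count 'G')) := by
  induction l generalizing a b c d with
  | nil => simp
  | cons x xs ih =>
    by_cases hA : x = 'A'
    · simp [hA, ih]; omega
    · by_cases hC : x = 'C'
      · simp [hC, ih]; omega
      · by_cases hG : x = 'G'
        · simp [hG, ih]; omega
        · simp [hA, hC, hG, ih]; omega

-- ===== VERDICT (by name: the statement is the Claim_ definition above) =====
theorem CountDNA_spec : Claim_equal_CountDNA := by
  intro seq _
  unfold Spec_CountDNA CountDNA CountDNA_alt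
  simp [countDNA_foldl_eq, PySem.Str.len, PySem.Str.count, chars_count_single]
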